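-- pv_equiv track=rewrite | github.com/dpsbot-project/DPSBot | tag.py | checkDepth
-- ===== SOURCE A (Python) =====
-- def checkDepth(line):
--     move = 0
--     depth = 0
--     depthList = []
--     for letter in line:
--         move += 1
--         if letter == '(':
--             depth += 1
--             depthList.append(depth)
--         elif letter == ')':
--             depthList.append(depth)
--             depth -= 1
--         else:
--             depthList.append(-1)
--     return depthList
-- ===== SOURCE B (Python) =====
-- from itertools import accumulate
--
-- def checkDepth(line):
--     deltas = [1 if c == '(' else (-1 if c == ')' else 0) for c in line]
--     prefix = [0] + list(accumulate(deltas))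
--     return [p + 1 if c == '(' else (p if c == ')' else -1)
--             for c, p in zip(line, prefix)]
-- ===== Notes on version B (the rewrite author's own statement) =====
-- stated objective: alternative
-- what changed: Replaces the single stateful loop with a two-phase table-then-map: a delta/prefix-balance table built with itertools.accumulate, then a stateless per-character map; the unused step counter is dropped.
import Mathlib
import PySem

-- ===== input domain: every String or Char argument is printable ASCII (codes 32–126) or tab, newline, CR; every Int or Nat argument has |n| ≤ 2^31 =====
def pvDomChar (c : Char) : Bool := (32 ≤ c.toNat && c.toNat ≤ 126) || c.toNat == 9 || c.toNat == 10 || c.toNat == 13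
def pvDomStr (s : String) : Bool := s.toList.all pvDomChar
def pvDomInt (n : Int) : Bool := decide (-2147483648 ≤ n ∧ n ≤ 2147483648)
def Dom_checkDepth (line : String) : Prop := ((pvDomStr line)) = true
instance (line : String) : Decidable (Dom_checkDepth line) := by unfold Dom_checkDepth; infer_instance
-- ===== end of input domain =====

-- B recomputes the same depth list via a two-phase table-then-map (prefix balances, then a stateless map) instead of A's single stateful loop; same cost, different decomposition.


-- ===== PORT A =====
-- literal port of A: fold over characters with state (move, depth, depthList)
def pvStepA (s : Int × Int × List Int) (letter : Char) : Int × Int × List Int :=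
  let move := s.1 + 1
  let depth := s.2.1
  let dl := s.2.2
  if letter = '(' then (move, depth + 1, dl ++ [depth + 1])
  else if letter = ')' then (move, depth - 1, dl ++ [depth])
  else (move, depth, dl ++ [(-1 : Int)])

def checkDepth (line : String) : List Int :=
  (line.toList.foldl pvStepA (0, 0, [])).2.2

-- ===== PORT B =====
-- B: delta per char, exclusive prefix balances ([0] + accumulate = scanl), stateless map
def pvDelta (c : Char) : Int := if c = '(' then 1 else if c = ')' then -1 else 0

def checkDepth_alt (line : String) : List Int :=
  let deltas := line.toList.map pvDelta
  let pfx := (deltas.scanl (· + ·) 0)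
  (line.toList.zip pfx).map (fun cp =>
    if cp.1 = '(' then cp.2 + 1 else if cp.1 = ')' then cp.2 else -1)

-- ===== PRECONDITION & SPEC =====
def Spec_checkDepth (line : String) (out : List Int) : Prop := out = checkDepth_alt line
instance (line : String) (out : List Int) : Decidable (Spec_checkDepth line out) := by unfold Spec_checkDepth; infer_instance

-- ===== CLAIM (what is proved, stated in full; the proofs are below) =====
def Claim_equal_checkDepth : Prop := ∀ (line : String), Dom_checkDepth line → Spec_checkDepth line (checkDepth line)

-- ===== LEMMAS AND PROOFS =====

-- ===== VERDICT (by name: the statement is the Claim_ definition above) =====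
lemma checkDepth_inv (cs : List Char) : ∀ (m d : Int) (acc : List Int),
    (cs.foldl pvStepA (m, d, acc)).2.2
    = acc ++ (cs.zip ((cs.map pvDelta).scanl (· + ·) d)).map (fun cp =>
        if cp.1 = '(' then cp.2 + 1 else if cp.1 = ')' then cp.2 else -1) := by
  induction cs with
  | nil => simp
  | cons c rest ih =>
    intro m d acc
    by_cases h1 : c = '('
    · have hs : pvStepA (m, d, acc) c = (m + 1, d + 1, acc ++ [d + 1]) := by
        simp [pvStepA, h1]
      rw [List.foldl_cons, hs, ih]
      simp [pvDelta, h1]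
    · by_cases h2 : c = ')'
      · have hs : pvStepA (m, d, acc) c = (m + 1, d - 1, acc ++ [d]) := by
          simp [pvStepA, h2]
        rw [List.foldl_cons, hs, ih]
        simp [pvDelta, h2, sub_eq_add_neg]
      · have hs : pvStepA (m, d, acc) c = (m + 1, d, acc ++ [(-1 : Int)]) := by
          simp [pvStepA, h1, h2]
        rw [List.foldl_cons, hs, ih]
        simp [pvDelta, h1, h2]

theorem checkDepth_spec : Claim_equal_checkDepth := by
  intro line _
  unfold Spec_checkDepth checkDepth checkDepth_alt
  simpa using checkDepth_inv line.toList 0 0 []
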